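-- pv_equiv track=rewrite | github.com/ZathSL/HCBD-analysis | main.py | manipulate_data_json
-- ===== SOURCE A (Python) =====
-- def manipulate_data_json(results):
--     dictionary_keys = results[0].keys()
--     dictionary_dataset = dict()
--     for key in dictionary_keys:
--         if key != 'posizione_ats' and not ('computed_region' in key):
--             dictionary_dataset[key] = []
--             for element in results:
--                 if key in element:
--                     dictionary_dataset[key].append(element[key])
--                 else:
--                     dictionary_dataset[key].append("")
--     return dictionary_dataset
-- ===== SOURCE B (Python) =====
-- def manipulate_data_json(results):
--     # Build a sparse inverted index in one pass over the pairs actually present: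
--     # index[key] maps row-number -> value. Then materialize each kept column
--     # densely from the index (kept keys are in results[0], so index[k] exists).
--     index = {}
--     for i, element in enumerate(results):
--         for k, v in element.items():
--             index.setdefault(k, {})[i] = v
--     n = len(results)
--     return {k: [index[k].get(i, '') for i in range(n)]
--             for k in results[0]
--             if k != 'posizione_ats' and 'computed_region' not in k}
-- ===== Notes on version B (the rewrite author's own statement) =====
-- stated objective: alternative
-- what changed: Instead of scanning the full row list once per kept key with per-row membership tests, B makes one pass over only the key/value pairs actually present to build a sparse inverted index (key -> {row number -> value}) and then materializes each kept column densely by row-number lookups with default '' into that index.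
import Mathlib
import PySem

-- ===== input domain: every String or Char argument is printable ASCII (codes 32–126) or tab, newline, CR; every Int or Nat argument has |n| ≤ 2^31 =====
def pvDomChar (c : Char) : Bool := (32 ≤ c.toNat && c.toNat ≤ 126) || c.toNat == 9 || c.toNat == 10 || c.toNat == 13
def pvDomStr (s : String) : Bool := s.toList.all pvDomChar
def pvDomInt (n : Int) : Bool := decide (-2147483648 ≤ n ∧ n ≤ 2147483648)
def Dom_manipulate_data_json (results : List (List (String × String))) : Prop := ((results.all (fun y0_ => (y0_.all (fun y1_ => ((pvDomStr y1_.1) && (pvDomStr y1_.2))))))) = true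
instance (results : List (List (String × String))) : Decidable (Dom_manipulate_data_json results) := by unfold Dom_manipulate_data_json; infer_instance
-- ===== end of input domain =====

-- B replaces A's per-key full rescans of the row list by a single pass over the key/value pairs
-- actually present, building a sparse inverted index (key -> {row number -> value}) and then
-- materializing each kept column from that index; same result, different data structure.

-- ===== PORT A =====
-- Python rows are dicts; an input row (assoc list) denotes the dict built by inserting its pairs in order.
def manipulate_data_json (results : List (List (String × String))) : List (String × List String) :=
  match PySem.List.pyGet? results 0 with
  | none => []  -- results[0] raises IndexError in Python; excluded by Pre_
  | some row0 =>
    let dictionary_keys := (PySem.Dict.ofList row0).keys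
    let dictionary_dataset :=
      dictionary_keys.foldl (fun dd key =>
        if key ≠ "posizione_ats" ∧ ¬ (PySem.Str.isIn "computed_region" key = true) then
          results.foldl (fun dd element =>
            dd.modify key [] (fun l =>
              l ++ [if (PySem.Dict.ofList element).contains key
                     then (PySem.Dict.ofList element).getD key "" else ""]))
            (dd.insert key [])
        else dd) PySem.Dict.empty
    dictionary_dataset.items

-- ===== PORT B =====
-- one present pair (key q.1, value q.2) of row number i: index.setdefault(k, {})[i] = v
def pvPairStep (i : Int) (idx : PySem.Dict String (PySem.Dict Int String)) (q : String × String) :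
    PySem.Dict String (PySem.Dict Int String) :=
  idx.modify q.1 PySem.Dict.empty (fun d => d.insert i q.2)

def manipulate_data_json_alt (results : List (List (String × String))) : List (String × List String) :=
  let index : PySem.Dict String (PySem.Dict Int String) :=
    (PySem.List.enumerate results 0).foldl
      (fun idx p => ((PySem.Dict.ofList p.2).items).foldl (pvPairStep p.1) idx)
      PySem.Dict.empty
  let n : Int := results.length
  match PySem.List.pyGet? results 0 with
  | none => []  -- iterating results[0] raises IndexError in Python; excluded by Pre_
  | some row0 =>
    (((PySem.Dict.ofList row0).keys.filter
        (fun k => !(k == "posizione_ats") && !(PySem.Str.isIn "computed_region" k))).foldl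
      (fun dd k => dd.insert k
        ((PySem.List.pyRange 0 n 1).map (fun i =>
          -- index[k]: every kept k is a key of results[0], so index contains k and
          -- Python's KeyError is unreachable; getD's default is never used for the outer lookup
          (index.getD k PySem.Dict.empty).getD i "")))
      PySem.Dict.empty).items

-- ===== PRECONDITION & SPEC =====
-- A raises IndexError on the empty list (results[0]); excluded.
def Pre_manipulate_data_json (results : List (List (String × String))) : Prop := results ≠ []
instance (results : List (List (String × String))) : Decidable (Pre_manipulate_data_json results) := by unfold Pre_manipulate_data_json; infer_instance
def pvWitness_manipulate_data_json : (List (List (String × String))) := [[("a", "1")]]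

def Spec_manipulate_data_json (results : List (List (String × String))) (out : List (String × List String)) : Prop := out = manipulate_data_json_alt results
instance (results : List (List (String × String))) (out : List (String × List String)) : Decidable (Spec_manipulate_data_json results out) := by unfold Spec_manipulate_data_json; infer_instance

-- ===== CLAIM (what is proved, stated in full; the proofs are below) =====
def Claim_equal_manipulate_data_json : Prop := ∀ (results : List (List (String × String))), Dom_manipulate_data_json results → Pre_manipulate_data_json results → Spec_manipulate_data_json results (manipulate_data_json results)

-- ===== LEMMAS AND PROOFS =====

-- the value a row contributes to column `key` (shared canonical form)
def pvCell (element : List (String × String)) (key : String) : String :=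
  (PySem.Dict.ofList element).getD key ""

-- A's guarded lookup equals `.get(key, '')`
lemma pvCell_eq (element : List (String × String)) (key : String) :
    (if (PySem.Dict.ofList element).contains key
      then (PySem.Dict.ofList element).getD key "" else "")
      = pvCell element key := by
  unfold pvCell
  by_cases h : (PySem.Dict.ofList element).contains key
  · simp [h]
  · simp [h, PySem.Dict.getD_of_not_contains _ _ (by simpa using h)]

-- A's inner loop: appending to a freshly inserted key is one insert of the whole column
lemma loopA (rs : List (List (String × String))) (k : String)
    (d : PySem.Dict String (List String)) (v0 : List String) :
    rs.foldl (fun dd element =>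
        dd.modify k [] (fun l =>
          l ++ [if (PySem.Dict.ofList element).contains k
                 then (PySem.Dict.ofList element).getD k "" else ""]))
      (d.insert k v0)
      = d.insert k (v0 ++ rs.map (fun e => pvCell e k)) := by
  induction rs generalizing v0 with
  | nil => simp
  | cons e rest ih =>
    simp only [List.foldl_cons, List.map_cons]
    have hstep : (d.insert k v0).modify k []
        (fun l => l ++ [if (PySem.Dict.ofList e).contains k
                        then (PySem.Dict.ofList e).getD k "" else ""])
        = d.insert k (v0 ++ [pvCell e k]) := by
      show (d.insert k v0).insert k _ = _
      rw [PySem.Dict.getD_insert_self, PySem.Dict.insert_insert_self, pvCell_eq]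
    rw [hstep, ih]
    simp

-- a fold inserting distinct fresh keys builds exactly the listed items
lemma items_build (ks : List String) (f : String → List String) (hnd : ks.Nodup) :
    ((ks.foldl (fun dd k => dd.insert k (f k)) PySem.Dict.empty).items : List (String × List String))
      = ks.map (fun k => (k, f k)) := by
  have := PySem.Dict.items_foldl_insert_fresh (l := ks) (k := id) (v := f)
    (d := (PySem.Dict.empty : PySem.Dict String (List String)))
    (by intro a _; simp) (by simpa using hnd)
  simpa using this

-- the last value stored for key k by a left-to-right pass over `pairs`
def pvLastVal (pairs : List (String × String)) (k : String) : Option String :=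
  ((pairs.filter (fun p => p.1 == k)).map Prod.snd).getLast?

-- B's inner loop at the row's own number s: last present value wins, else whatever was there
lemma inner_get (pairs : List (String × String)) (s : Int)
    (idx0 : PySem.Dict String (PySem.Dict Int String)) (k : String) :
    (((pairs.foldl (pvPairStep s) idx0).getD k PySem.Dict.empty).get? s)
      = (pvLastVal pairs k).or ((idx0.getD k PySem.Dict.empty).get? s) := by
  induction pairs generalizing idx0 with
  | nil => simp [pvLastVal]
  | cons q rest ih =>
    simp only [List.foldl_cons]
    rw [ih]
    by_cases hk : k = q.1
    · have h1 : ((pvPairStep s idx0 q).getD k PySem.Dict.empty).get? s = some q.2 := by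
        unfold pvPairStep
        rw [hk, PySem.Dict.getD_modify_self, PySem.Dict.get?_insert_self]
      rw [h1]
      have hfilter : (q :: rest).filter (fun p => p.1 == k) = q :: rest.filter (fun p => p.1 == k) := by
        simp [hk]
      unfold pvLastVal
      rw [hfilter]
      cases hrest : ((rest.filter (fun p => p.1 == k)).map Prod.snd).getLast? with
      | none =>
        have hnil : (rest.filter (fun p => p.1 == k)).map Prod.snd = [] :=
          List.getLast?_eq_none_iff.mp hrest
        simp [hnil]
      | some v =>
        rw [List.map_cons, List.getLast?_cons]
        simp [hrest]
    · have h1 : ((pvPairStep s idx0 q).getD k PySem.Dict.empty).get? s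
          = (idx0.getD k PySem.Dict.empty).get? s := by
        unfold pvPairStep
        rw [PySem.Dict.getD_modify, if_neg hk]
      rw [h1]
      have hfilter : (q :: rest).filter (fun p => p.1 == k) = rest.filter (fun p => p.1 == k) := by
        simp [List.filter_cons]
        intro h; exact absurd h.symm hk
      unfold pvLastVal
      rw [hfilter]

-- B's inner loop leaves every other row number untouched
lemma inner_get_ne (pairs : List (String × String)) (s j : Int) (hj : j ≠ s)
    (idx0 : PySem.Dict String (PySem.Dict Int String)) (k : String) :
    (((pairs.foldl (pvPairStep s) idx0).getD k PySem.Dict.empty).get? j)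
      = (idx0.getD k PySem.Dict.empty).get? j := by
  induction pairs generalizing idx0 with
  | nil => rfl
  | cons q rest ih =>
    simp only [List.foldl_cons]
    rw [ih]
    unfold pvPairStep
    rw [PySem.Dict.getD_modify]
    by_cases hk : k = q.1
    · rw [if_pos hk, PySem.Dict.get?_insert_of_ne _ _ hj, hk]
    · rw [if_neg hk]

-- on a dict with distinct keys (as `ofList` yields) the last stored value IS the dict lookup
lemma lastVal_items (d : PySem.Dict String String) (hn : d.keys.Nodup) (k : String) :
    pvLastVal d.items k = d.get? k := by
  obtain ⟨l⟩ := d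
  induction l with
  | nil => rfl
  | cons q rest ih =>
    obtain ⟨k0, v0⟩ := q
    rw [PySem.Dict.get?_mk_cons]
    have hn2 : (k0 :: rest.map Prod.fst).Nodup := by
      simpa [PySem.Dict.keys, PySem.Dict.items] using hn
    obtain ⟨hk0', hn3⟩ := List.nodup_cons.mp hn2
    have hn' : ((PySem.Dict.mk rest).keys : List String).Nodup := by
      simpa [PySem.Dict.keys, PySem.Dict.items] using hn3
    by_cases hk : k0 = k
    · subst hk
      have hk0 : k0 ∉ rest.map Prod.fst := hk0'
      have hfe : rest.filter (fun p => p.1 == k0) = [] := by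
        rw [List.filter_eq_nil_iff]
        intro p hp
        simp only [beq_iff_eq]
        intro h
        exact hk0 (h ▸ List.mem_map_of_mem hp)
      unfold pvLastVal
      simp [List.filter_cons, hfe]
    · rw [if_neg (by simpa using hk)]
      rw [← ih hn']
      unfold pvLastVal
      simp [List.filter_cons, hk]

-- the whole index pass: entry (k, i) is exactly row number i's dict lookup of k
lemma outer_get (rows : List (List (String × String))) (s : Int)
    (idx : PySem.Dict String (PySem.Dict Int String))
    (H : ∀ k j, s ≤ j → ((idx.getD k PySem.Dict.empty).get? j) = none)
    (k : String) (i : Int) :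
    ((((PySem.List.enumerate rows s).foldl
        (fun idx p => ((PySem.Dict.ofList p.2).items).foldl (pvPairStep p.1) idx) idx).getD
        k PySem.Dict.empty).get? i)
      = if s ≤ i then (rows[(i - s).toNat]?.bind (fun row => (PySem.Dict.ofList row).get? k))
        else (idx.getD k PySem.Dict.empty).get? i := by
  induction rows generalizing s idx with
  | nil =>
    rw [PySem.List.enumerate_nil, List.foldl_nil]
    by_cases h : s ≤ i
    · rw [if_pos h, List.getElem?_nil, Option.bind_none, H k i h]
    · rw [if_neg h]
  | cons r rest ih =>
    rw [PySem.List.enumerate_cons, List.foldl_cons]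
    have H1 : ∀ k j, s + 1 ≤ j →
        ((((PySem.Dict.ofList r).items.foldl (pvPairStep s) idx).getD k PySem.Dict.empty).get? j) = none := by
      intro k j hj
      rw [inner_get_ne _ _ _ (by omega)]
      exact H k j (by omega)
    rw [ih (s + 1) _ H1]
    by_cases h1 : s + 1 ≤ i
    · rw [if_pos h1, if_pos (by omega)]
      have hnat : (i - s).toNat = (i - (s + 1)).toNat + 1 := by omega
      rw [hnat, List.getElem?_cons_succ]
    · by_cases h0 : s ≤ i
      · have hi : i = s := by omega
        subst hi
        rw [if_neg h1, if_pos le_rfl, inner_get _ _ _ _,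
            H k i le_rfl, Option.or_none,
            lastVal_items _ (PySem.Dict.nodup_keys_ofList r)]
        simp
      · rw [if_neg h1, if_neg h0, inner_get_ne _ _ _ (by omega)]

-- ===== VERDICT (by name: the statement is the Claim_ definition above) =====
theorem manipulate_data_json_spec : Claim_equal_manipulate_data_json := by
  intro results _ hpre
  unfold Spec_manipulate_data_json
  obtain ⟨row0, rest, rfl⟩ : ∃ r t, results = r :: t := by
    cases results with
    | nil => exact absurd rfl hpre
    | cons r t => exact ⟨r, t, rfl⟩
  unfold manipulate_data_json manipulate_data_json_alt
  rw [show PySem.List.pyGet? (row0 :: rest) 0 = some row0 by simp [PySem.List.pyGet?, PySem.List.pyIdx?]]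
  dsimp only
  set results := row0 :: rest with hres
  set keys0 := (PySem.Dict.ofList row0).keys with hk
  have hnd0 : keys0.Nodup := PySem.Dict.nodup_keys_ofList row0
  set p : String → Bool :=
    fun k => !(k == "posizione_ats") && !(PySem.Str.isIn "computed_region" k) with hp
  have hndf : (keys0.filter p).Nodup := hnd0.filter p
  set col : String → List String :=
    fun k => results.map (fun e => pvCell e k) with hcol
  -- A side
  have hA : (keys0.foldl (fun dd key =>
        if key ≠ "posizione_ats" ∧ ¬ (PySem.Str.isIn "computed_region" key = true) then
          results.foldl (fun dd element =>
            dd.modify key [] (fun l =>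
              l ++ [if (PySem.Dict.ofList element).contains key
                     then (PySem.Dict.ofList element).getD key "" else ""]))
            (dd.insert key [])
        else dd) PySem.Dict.empty).items
      = (keys0.filter p).map (fun k => (k, col k)) := by
    have hfun : (fun (dd : PySem.Dict String (List String)) key =>
        if key ≠ "posizione_ats" ∧ ¬ (PySem.Str.isIn "computed_region" key = true) then
          results.foldl (fun dd element =>
            dd.modify key [] (fun l =>
              l ++ [if (PySem.Dict.ofList element).contains key
                     then (PySem.Dict.ofList element).getD key "" else ""]))
            (dd.insert key [])
        else dd)
        = (fun dd key => if p key then dd.insert key (col key) else dd) := by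
      have hiff : ∀ key : String,
          (key ≠ "posizione_ats" ∧ ¬ (PySem.Str.isIn "computed_region" key = true)) ↔ p key = true := by
        intro key; rw [hp]; simp [Bool.not_eq_true]
      funext dd key
      by_cases hc : p key = true
      · rw [if_pos ((hiff key).mpr hc), if_pos hc, loopA]
        simp [hcol]
      · rw [if_neg (fun h => hc ((hiff key).mp h)), if_neg hc]
    rw [hfun, ← List.foldl_filter, items_build _ _ hndf]
  rw [hA]
  -- B side: the dense column read from the index equals the row-by-row lookups
  have hcolB : ∀ k : String,
      (PySem.List.pyRange 0 (results.length : Int) 1).map (fun i =>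
        (((PySem.List.enumerate results 0).foldl
            (fun idx p => ((PySem.Dict.ofList p.2).items).foldl (pvPairStep p.1) idx)
            PySem.Dict.empty).getD k PySem.Dict.empty).getD i "")
        = col k := by
    intro k
    have hpt : ∀ i ∈ PySem.List.pyRange 0 (results.length : Int) 1,
        (((PySem.List.enumerate results 0).foldl
            (fun idx p => ((PySem.Dict.ofList p.2).items).foldl (pvPairStep p.1) idx)
            PySem.Dict.empty).getD k PySem.Dict.empty).getD i ""
          = pvCell (PySem.List.pyGetD results i []) k := by
      intro i hi
      obtain ⟨h0, hlt⟩ := PySem.List.mem_pyRange_one.mp hi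
      have hnatlt : i.toNat < results.length := by omega
      rw [PySem.Dict.getD_eq_get?_getD,
          outer_get results 0 PySem.Dict.empty (by intro k j _; simp) k i,
          if_pos h0]
      have hget : results[(i - 0).toNat]? = some results[i.toNat] := by
        simp only [sub_zero]
        exact List.getElem?_eq_getElem hnatlt
      rw [hget, Option.bind_some, PySem.List.pyGetD_of_nonneg _ _ h0,
          List.getD_eq_getElem _ _ hnatlt]
      unfold pvCell
      rw [PySem.Dict.getD_eq_get?_getD]
    rw [List.map_congr_left hpt, hcol]
    have := PySem.List.map_pyGetD_pyRange_zero results []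
    calc (PySem.List.pyRange 0 (results.length : Int) 1).map
            (fun i => pvCell (PySem.List.pyGetD results i []) k)
        = ((PySem.List.pyRange 0 (results.length : Int) 1).map
            (fun i => PySem.List.pyGetD results i [])).map (fun e => pvCell e k) := by
          rw [List.map_map]; rfl
      _ = results.map (fun e => pvCell e k) := by
          rw [show ((results.length : Int)) = PySem.List.len results from rfl, this]
  have hB : ((keys0.filter p).foldl
      (fun dd k => dd.insert k
        ((PySem.List.pyRange 0 (results.length : Int) 1).map (fun i =>
          (((PySem.List.enumerate results 0).foldl
              (fun idx p => ((PySem.Dict.ofList p.2).items).foldl (pvPairStep p.1) idx)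
              PySem.Dict.empty).getD k PySem.Dict.empty).getD i "")))
      PySem.Dict.empty).items
      = (keys0.filter p).map (fun k => (k, col k)) := by
    rw [items_build _ _ hndf]
    exact List.map_congr_left (fun k _ => by rw [hcolB k])
  exact hB.symm
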